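-- pv_equiv track=rewrite | github.com/jrbergen/adventofcode-jrb | day16/day16.py | count_valid_fields_total
-- ===== SOURCE A (Python) =====
-- from typing import List, Tuple, Dict, NoReturn, Optional
--
-- def get_field_index(fields: Dict[str, List[int]], fieldname: str) -> int:
--     return list(fields.keys()).index(fieldname)
--
-- def count_valid_fields_total(fields: Dict[str, List[int]],
--                              tickets: List[List[int]],
--                              fieldname: str) -> int:
--     fieldidx = get_field_index(fields, fieldname)
--
--     n_valid = 0
--     for ticket in tickets:
--         lbounds, ubounds = fields[fieldname][::2], fields[fieldname][1::2]
--         for lbound, ubound in zip(lbounds, ubounds):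
--             if lbound <= ticket[fieldidx] <= ubound:
--                 n_valid += 1
--     return n_valid
-- ===== SOURCE B (Python) =====
-- def get_field_index(fields, fieldname):
--     return list(fields.keys()).index(fieldname)
--
--
-- def _bisect_left(a, x):
--     lo, hi = 0, len(a)
--     while lo < hi:
--         mid = (lo + hi) // 2
--         if a[mid] < x:
--             lo = mid + 1
--         else:
--             hi = mid
--     return lo
--
--
-- def _bisect_right(a, x):
--     lo, hi = 0, len(a)
--     while lo < hi:
--         mid = (lo + hi) // 2
--         if x < a[mid]:
--             hi = mid
--         else:
--             lo = mid + 1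
--     return lo
--
--
-- def count_valid_fields_total(fields, tickets, fieldname):
--     fieldidx = get_field_index(fields, fieldname)
--     bounds = fields[fieldname]
--     pairs = [(bounds[i], bounds[i + 1]) for i in range(0, len(bounds) - 1, 2)]
--     if not pairs:
--         return 0
--     values = sorted(ticket[fieldidx] for ticket in tickets)
--     total = 0
--     for lbound, ubound in pairs:
--         if lbound <= ubound:
--             total += _bisect_right(values, ubound) - _bisect_left(values, lbound)
--     return total
-- ===== Notes on version B (the rewrite author's own statement) =====
-- stated objective: alternative
-- what changed: Instead of scanning every range pair for every ticket, B builds the (lbound, ubound) pairs once by index, extracts the field's value of each ticket, sorts the values, and answers each range pair with two hand-written binary searches (bisect_right(ubound) - bisect_left(lbound)).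
import Mathlib
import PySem

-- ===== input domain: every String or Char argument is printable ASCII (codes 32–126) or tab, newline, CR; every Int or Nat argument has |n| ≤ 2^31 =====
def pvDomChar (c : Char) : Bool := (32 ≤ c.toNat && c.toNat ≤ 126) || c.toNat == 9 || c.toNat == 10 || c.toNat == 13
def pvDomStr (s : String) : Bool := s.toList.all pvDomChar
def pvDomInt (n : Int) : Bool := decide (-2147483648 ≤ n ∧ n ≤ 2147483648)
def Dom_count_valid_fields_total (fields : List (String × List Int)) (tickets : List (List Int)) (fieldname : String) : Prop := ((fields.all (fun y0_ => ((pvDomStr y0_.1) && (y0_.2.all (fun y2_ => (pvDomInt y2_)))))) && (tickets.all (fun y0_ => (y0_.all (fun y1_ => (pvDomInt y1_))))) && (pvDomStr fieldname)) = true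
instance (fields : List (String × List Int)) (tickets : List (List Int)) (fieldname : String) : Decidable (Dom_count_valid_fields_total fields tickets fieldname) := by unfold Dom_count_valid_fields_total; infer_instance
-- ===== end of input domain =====

-- B re-implements the count: it builds the (lbound, ubound) pairs once by index, extracts and
-- sorts the tickets' field values, and answers each pair with two binary searches
-- (bisect_right - bisect_left) instead of A's per-ticket scan of all range pairs.


-- ===== PORT A =====
-- helper shared by both Pythons (both define the identical get_field_index);
-- none = ValueError from list.index, excluded by Pre_
def get_field_index (fields : List (String × List Int)) (fieldname : String) : Option Nat :=
  PySem.List.index? (PySem.Dict.keys (PySem.Dict.mk fields)) fieldname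

def count_valid_fields_total (fields : List (String × List Int)) (tickets : List (List Int)) (fieldname : String) : Int :=
  match get_field_index fields fieldname with
  | none => 0          -- ValueError in Python; excluded by Pre_
  | some fieldidx =>
    tickets.foldl (fun n_valid ticket =>
      -- lbounds, ubounds = fields[fieldname][::2], fields[fieldname][1::2]  (recomputed per ticket, as in A)
      let fb := PySem.Dict.getD (PySem.Dict.mk fields) fieldname []
      let lbounds := (PySem.List.slice? fb none none 2).getD []      -- step 2 ≠ 0: slice? never none
      let ubounds := (PySem.List.slice? fb (some 1) none 2).getD []
      (lbounds.zip ubounds).foldl (fun n lu =>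
        -- ticket[fieldidx]: pyGetD's default is unreachable under Pre_ (index in range)
        if lu.1 ≤ PySem.List.pyGetD ticket (fieldidx : Int) 0 ∧
           PySem.List.pyGetD ticket (fieldidx : Int) 0 ≤ lu.2 then n + 1 else n) n_valid) 0

-- ===== PORT B =====
-- Source B's hand-written _bisect_left/_bisect_right are the standard lo/hi binary-search loops;
-- PySem.List.bisectLeft / bisectRight are exactly that algorithm (same loop, same midpoints).
def count_valid_fields_total_alt (fields : List (String × List Int)) (tickets : List (List Int)) (fieldname : String) : Int :=
  match get_field_index fields fieldname with
  | none => 0          -- ValueError in Python; excluded by Pre_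
  | some fieldidx =>
    let bounds := PySem.Dict.getD (PySem.Dict.mk fields) fieldname []
    -- pairs = [(bounds[i], bounds[i+1]) for i in range(0, len(bounds) - 1, 2)]; indices in range
    let pairs := (PySem.List.pyRange 0 ((bounds.length : Int) - 1) 2).map
      (fun i => (PySem.List.pyGetD bounds i 0, PySem.List.pyGetD bounds (i + 1) 0))
    if pairs.isEmpty then 0
    else
      -- values = sorted(ticket[fieldidx] for ticket in tickets); default unreachable under Pre_
      let values := PySem.List.sorted
        (tickets.map (fun ticket => PySem.List.pyGetD ticket (fieldidx : Int) 0)) (fun v => v) false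
      pairs.foldl (fun total lu =>
        if lu.1 ≤ lu.2 then
          total + ((PySem.List.bisectRight values lu.2 : Int) - (PySem.List.bisectLeft values lu.1 : Int))
        else total) 0

-- ===== PRECONDITION & SPEC =====
-- Pre_ excludes exactly the inputs where A raises: fieldname not a key (ValueError), and — only
-- when the field has at least one complete range pair, so ticket[fieldidx] is actually evaluated —
-- a ticket shorter than the field index (IndexError). B raises on exactly the same inputs.
def Pre_count_valid_fields_total (fields : List (String × List Int)) (tickets : List (List Int)) (fieldname : String) : Prop :=
  (PySem.List.index? (fields.map Prod.fst) fieldname).isSome = true ∧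
  (2 ≤ (PySem.Dict.getD (PySem.Dict.mk fields) fieldname []).length →
    ∀ t ∈ tickets, (PySem.List.index? (fields.map Prod.fst) fieldname).getD 0 < t.length)
instance (fields : List (String × List Int)) (tickets : List (List Int)) (fieldname : String) : Decidable (Pre_count_valid_fields_total fields tickets fieldname) := by unfold Pre_count_valid_fields_total; infer_instance

def pvWitness_count_valid_fields_total : (List (String × List Int)) × List (List Int) × String :=
  ([("row", [1, 5, 8, 9]), ("seat", [2, 3])], [[3, 2], [7, 0], [9, 1]], "row")

def Spec_count_valid_fields_total (fields : List (String × List Int)) (tickets : List (List Int)) (fieldname : String) (out : Int) : Prop := out = count_valid_fields_total_alt fields tickets fieldname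
instance (fields : List (String × List Int)) (tickets : List (List Int)) (fieldname : String) (out : Int) : Decidable (Spec_count_valid_fields_total fields tickets fieldname out) := by unfold Spec_count_valid_fields_total; infer_instance

-- ===== CLAIM (what is proved, stated in full; the proofs are below) =====
def Claim_equal_count_valid_fields_total : Prop := ∀ (fields : List (String × List Int)) (tickets : List (List Int)) (fieldname : String), Dom_count_valid_fields_total fields tickets fieldname → Pre_count_valid_fields_total fields tickets fieldname → Spec_count_valid_fields_total fields tickets fieldname (count_valid_fields_total fields tickets fieldname)

-- ===== LEMMAS AND PROOFS =====

-- a fold that ignores its elements returns its accumulator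
theorem foldl_const_id {α β : Type} (l : List α) (a : β) : l.foldl (fun n _ => n) a = a := by
  induction l generalizing a with
  | nil => rfl
  | cons x t ih => simpa using ih a

-- filterMap of in-range lookups is a map of getD
theorem filterMap_getElem?_range (xs : List Int) (f : Nat → Nat) (n : Nat)
    (h : ∀ k < n, f k < xs.length) :
    List.filterMap (fun k => xs[f k]?) (List.range n) =
      (List.range n).map (fun k => xs.getD (f k) 0) := by
  induction n with
  | zero => simp
  | succ m ih =>
    rw [List.range_succ, List.filterMap_append, List.map_append,
      ih (fun k hk => h k (Nat.lt_succ_of_lt hk))]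
    have hm : f m < xs.length := h m (Nat.lt_succ_self m)
    simp [List.getElem?_eq_getElem hm]

-- zipping two maps over ranges truncates to the shorter range
theorem zip_map_range {α β : Type} (f : Nat → α) (g : Nat → β) (c1 c2 : Nat) (h : c2 ≤ c1) :
    ((List.range c1).map f).zip ((List.range c2).map g) =
      (List.range c2).map (fun k => (f k, g k)) := by
  apply List.ext_getElem
  · simp [Nat.min_eq_right h]
  · intro i h1 h2
    simp only [List.length_zip, List.length_map, List.length_range] at h1
    have hi2 : i < c2 := lt_of_lt_of_le h1 (le_of_eq (Nat.min_eq_right h))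
    have hi1 : i < c1 := lt_of_lt_of_le hi2 h
    simp [List.getElem_zip, List.getElem_range]

-- the even-index slice bounds[::2] as a filterMap of in-range lookups
theorem sliceEv (bs : List Int) :
    PySem.List.slice? bs none none 2 =
      some (List.filterMap (fun k : Nat => bs[2 * k]?) (List.range ((bs.length + 1) / 2))) := by
  simp only [PySem.List.slice?, PySem.List.sliceIndices]
  norm_num
  have hc : (if 0 < bs.length then (((bs.length : Int) + 2 - 1) / 2).toNat else 0) =
      (bs.length + 1) / 2 := by
    split_ifs with h <;> omega
  rw [hc]
  apply List.filterMap_congr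
  intro k _
  congr 1

-- the odd-index slice bounds[1::2] as a filterMap of in-range lookups (needs a nonempty list)
theorem sliceOd (bs : List Int) (hL : 1 ≤ bs.length) :
    PySem.List.slice? bs (some 1) none 2 =
      some (List.filterMap (fun k : Nat => bs[2 * k + 1]?) (List.range (bs.length / 2))) := by
  simp only [PySem.List.slice?, PySem.List.sliceIndices]
  norm_num
  have h1 : (min 1 (bs.length : Int)) = 1 := by omega
  rw [h1]
  have hc : (if 1 < bs.length then (((bs.length : Int) - 1 + 2 - 1) / 2).toNat else 0) =
      bs.length / 2 := by
    split_ifs with h <;> omega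
  rw [hc]
  apply List.filterMap_congr
  intro k _
  congr 1
  omega

-- A's zip of step-2 slices is the index-pair list
theorem zip_slices_eq (bs : List Int) :
    (((PySem.List.slice? bs none none 2).getD []).zip
        ((PySem.List.slice? bs (some 1) none 2).getD [])) =
      (List.range (bs.length / 2)).map (fun k => (bs.getD (2 * k) 0, bs.getD (2 * k + 1) 0)) := by
  cases bs with
  | nil => decide
  | cons a t =>
    set bs := a :: t with hbs
    have hL : 1 ≤ bs.length := by simp [hbs]
    rw [sliceEv bs, sliceOd bs hL]
    simp only [Option.getD_some]
    rw [filterMap_getElem?_range bs (fun k => 2 * k) _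
        (by intro k hk; show 2 * k < bs.length; omega),
      filterMap_getElem?_range bs (fun k => 2 * k + 1) _
        (by intro k hk; show 2 * k + 1 < bs.length; omega)]
    exact zip_map_range _ _ _ _ (by omega)

-- B's range(0, len-1, 2) pair comprehension is the same index-pair list
theorem pyRange_pairs_eq (bs : List Int) :
    (PySem.List.pyRange 0 ((bs.length : Int) - 1) 2).map
        (fun i => (PySem.List.pyGetD bs i 0, PySem.List.pyGetD bs (i + 1) 0)) =
      (List.range (bs.length / 2)).map (fun k => (bs.getD (2 * k) 0, bs.getD (2 * k + 1) 0)) := by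
  rw [PySem.List.pyRange_of_pos 0 ((bs.length : Int) - 1) (by norm_num)]
  have hc : (if (0:Int) < (bs.length : Int) - 1 then (((bs.length : Int) - 1 - 0 + 2 - 1) / 2).toNat else 0) =
      bs.length / 2 := by
    split_ifs with h <;> omega
  rw [hc, List.map_map]
  apply List.map_congr_left
  intro k hk
  have h1 : (0 + 2 * (k : Int)) = ((2 * k : Nat) : Int) := by push_cast; ring
  have h2 : ((2 * k : Nat) : Int) + 1 = ((2 * k + 1 : Nat) : Int) := by push_cast; ring
  simp only [Function.comp, h1, h2, PySem.List.pyGetD_natCast]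

-- countP equals c when the predicate holds exactly on the first c positions
theorem countP_eq_of_index_iff {p : Int → Bool} : ∀ (xs : List Int) (c : Nat), c ≤ xs.length →
    (∀ j (hj : j < xs.length), p xs[j] = true ↔ j < c) → xs.countP p = c := by
  intro xs
  induction xs with
  | nil =>
    intro c hc _
    simp only [List.length_nil, Nat.le_zero] at hc
    simp [hc]
  | cons a t ih =>
    intro c hc h
    cases c with
    | zero =>
      rw [List.countP_eq_zero]
      intro v hv
      obtain ⟨j, hj, rfl⟩ := List.mem_iff_getElem.mp hv
      simpa using (h j hj)
    | succ c =>
      have ha : p a = true := by simpa using (h 0 (by simp)).mpr (Nat.succ_pos c)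
      have ht : t.countP p = c := by
        apply ih c (by simpa using hc)
        intro j hj
        have := h (j + 1) (by simpa using Nat.succ_lt_succ hj)
        simpa [Nat.succ_lt_succ_iff] using this
      simp [ha, ht]

theorem bisectLeft_eq_countP (xs : List Int) (x : Int)
    (h : List.Pairwise (fun a b => a ≤ b) xs) :
    PySem.List.bisectLeft xs x = xs.countP (fun v => decide (v < x)) := by
  obtain ⟨hle, hlt, hge⟩ := PySem.List.bisectLeft_spec xs x h
  refine (countP_eq_of_index_iff xs _ hle ?_).symm
  intro j hj
  constructor
  · intro hp
    by_contra hnot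
    exact absurd (hge j hj (Nat.le_of_not_lt hnot)) (by simpa using hp)
  · intro hlt'; simpa using hlt j hj hlt'

theorem bisectRight_eq_countP (xs : List Int) (x : Int)
    (h : List.Pairwise (fun a b => a ≤ b) xs) :
    PySem.List.bisectRight xs x = xs.countP (fun v => decide (v ≤ x)) := by
  obtain ⟨hle, hlt, hge⟩ := PySem.List.bisectRight_spec xs x h
  refine (countP_eq_of_index_iff xs _ hle ?_).symm
  intro j hj
  constructor
  · intro hp
    by_contra hnot
    exact absurd (hge j hj (Nat.le_of_not_lt hnot)) (by simpa using hp)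
  · intro hlt'; simpa using hlt j hj hlt'

-- counting v ≤ u splits at l when l ≤ u
theorem countP_le_split (xs : List Int) (l u : Int) (hlu : l ≤ u) :
    xs.countP (fun v => decide (v ≤ u)) =
      xs.countP (fun v => decide (v < l)) + xs.countP (fun v => decide (l ≤ v ∧ v ≤ u)) := by
  induction xs with
  | nil => simp
  | cons a t ih =>
    simp only [List.countP_cons, ih, decide_eq_true_eq]
    split_ifs <;> omega

theorem bisect_range (xs : List Int) (l u : Int)
    (h : List.Pairwise (fun a b => a ≤ b) xs) (hlu : l ≤ u) :
    (PySem.List.bisectRight xs u : Int) - (PySem.List.bisectLeft xs l : Int) =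
      (xs.countP (fun v => decide (l ≤ v ∧ v ≤ u)) : Int) := by
  rw [bisectLeft_eq_countP xs l h, bisectRight_eq_countP xs u h,
    countP_le_split xs l u hlu]
  push_cast
  ring

-- double counting: summing per value over the pairs = summing per pair over the values
theorem sum_count_swap (vs : List Int) (ps : List (Int × Int)) :
    (vs.map (fun v => ((ps.countP (fun lu => decide (lu.1 ≤ v ∧ v ≤ lu.2)) : Nat) : Int))).sum =
      (ps.map (fun lu => ((vs.countP (fun v => decide (lu.1 ≤ v ∧ v ≤ lu.2)) : Nat) : Int))).sum := by
  induction vs with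
  | nil => simp
  | cons v vs ih =>
    have hsplit : (ps.map (fun lu =>
        ((((v :: vs).countP (fun w => decide (lu.1 ≤ w ∧ w ≤ lu.2)) : Nat)) : Int))).sum =
        (ps.map (fun lu => (if (fun lu : Int × Int => decide (lu.1 ≤ v ∧ v ≤ lu.2)) lu = true then (1 : Int) else 0) +
          ((vs.countP (fun w => decide (lu.1 ≤ w ∧ w ≤ lu.2)) : Nat) : Int))).sum := by
      apply congrArg List.sum
      apply List.map_congr_left
      intro lu _
      rw [List.countP_cons]
      push_cast
      simp only [decide_eq_true_eq]
      split_ifs <;> omega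
    rw [List.map_cons, List.sum_cons, ih, hsplit,
      PySem.List.sum_map_add_int ps
        (fun lu => if (fun lu : Int × Int => decide (lu.1 ≤ v ∧ v ≤ lu.2)) lu = true then (1 : Int) else 0)
        (fun lu => ((vs.countP (fun w => decide (lu.1 ≤ w ∧ w ≤ lu.2)) : Nat) : Int)),
      PySem.List.sum_map_ite_one_zero]

-- ===== VERDICT (by name: the statement is the Claim_ definition above) =====
theorem count_valid_fields_total_spec : Claim_equal_count_valid_fields_total := by
  intro fields tickets fieldname _hDom _hPre
  unfold Spec_count_valid_fields_total count_valid_fields_total count_valid_fields_total_alt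
  cases hidx : get_field_index fields fieldname with
  | none => rfl
  | some fieldidx =>
    simp only []
    set vf : List Int → Int := fun ticket => PySem.List.pyGetD ticket (fieldidx : Int) 0 with hvf
    set fb := PySem.Dict.getD (PySem.Dict.mk fields) fieldname [] with hfb
    set ipairs := (List.range (fb.length / 2)).map
      (fun k => (fb.getD (2 * k) 0, fb.getD (2 * k + 1) 0)) with hipairs
    have hA' : (((PySem.List.slice? fb none none 2).getD []).zip
        ((PySem.List.slice? fb (some 1) none 2).getD [])) = ipairs := zip_slices_eq fb
    have hB' : (PySem.List.pyRange 0 ((fb.length : Int) - 1) 2).map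
        (fun i => (PySem.List.pyGetD fb i 0, PySem.List.pyGetD fb (i + 1) 0)) = ipairs :=
      pyRange_pairs_eq fb
    rw [hB']
    by_cases hemp : ipairs.isEmpty
    · rw [if_pos hemp]
      have : ipairs = [] := List.isEmpty_iff.mp hemp
      have hfun : (fun (n_valid : Int) (ticket : List Int) =>
          ((((PySem.List.slice? fb none none 2).getD []).zip
            ((PySem.List.slice? fb (some 1) none 2).getD [])).foldl (fun n lu =>
            if lu.1 ≤ vf ticket ∧ vf ticket ≤ lu.2 then n + 1 else n) n_valid)) =
          (fun (n_valid : Int) (_ : List Int) => n_valid) := by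
        funext n_valid ticket
        rw [hA', this]
        rfl
      rw [hfun]
      exact foldl_const_id tickets 0
    · rw [if_neg hemp]
      set values := PySem.List.sorted (tickets.map vf) (fun v => v) false with hvalues
      have hsorted : List.Pairwise (fun a b => a ≤ b) values :=
        PySem.List.sorted_pairwise (tickets.map vf) (fun v => v)
      have hperm : values.Perm (tickets.map vf) := PySem.List.sorted_perm (tickets.map vf) _ _
      have hA : tickets.foldl (fun n_valid ticket =>
            ((((PySem.List.slice? fb none none 2).getD []).zip
              ((PySem.List.slice? fb (some 1) none 2).getD [])).foldl (fun n lu =>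
              if lu.1 ≤ vf ticket ∧ vf ticket ≤ lu.2 then n + 1 else n) n_valid)) 0 =
          (tickets.map (fun t =>
            ((ipairs.countP (fun lu => decide (lu.1 ≤ vf t ∧ vf t ≤ lu.2)) : Nat) : Int))).sum := by
        have h1 : (fun (n_valid : Int) (ticket : List Int) =>
            ((((PySem.List.slice? fb none none 2).getD []).zip
              ((PySem.List.slice? fb (some 1) none 2).getD [])).foldl (fun n lu =>
              if lu.1 ≤ vf ticket ∧ vf ticket ≤ lu.2 then n + 1 else n) n_valid)) =
            (fun n_valid ticket => n_valid +
              ((ipairs.countP (fun lu => decide (lu.1 ≤ vf ticket ∧ vf ticket ≤ lu.2)) : Nat) : Int)) := by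
          funext n_valid ticket
          rw [hA']
          exact PySem.List.foldl_ite_add_one _ ipairs n_valid
        rw [h1, PySem.List.foldl_add, zero_add]
      have hB : ipairs.foldl (fun total lu =>
            if lu.1 ≤ lu.2 then
              total + ((PySem.List.bisectRight values lu.2 : Int) -
                (PySem.List.bisectLeft values lu.1 : Int))
            else total) 0 =
          (ipairs.map (fun lu =>
            ((values.countP (fun v => decide (lu.1 ≤ v ∧ v ≤ lu.2)) : Nat) : Int))).sum := by
        have h2 : (fun (total : Int) (lu : Int × Int) =>
            if lu.1 ≤ lu.2 then
              total + ((PySem.List.bisectRight values lu.2 : Int) -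
                (PySem.List.bisectLeft values lu.1 : Int))
            else total) =
            (fun total lu => total +
              ((values.countP (fun v => decide (lu.1 ≤ v ∧ v ≤ lu.2)) : Nat) : Int)) := by
          funext total lu
          by_cases hlu : lu.1 ≤ lu.2
          · rw [if_pos hlu, bisect_range values lu.1 lu.2 hsorted hlu]
          · rw [if_neg hlu]
            have hz : values.countP (fun v => decide (lu.1 ≤ v ∧ v ≤ lu.2)) = 0 := by
              rw [List.countP_eq_zero]
              intro v _
              simp only [decide_eq_true_eq]
              omega
            rw [hz]
            simp
        rw [h2, PySem.List.foldl_add, zero_add]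
      rw [hA, hB]
      have hcnt : (ipairs.map (fun lu =>
          ((values.countP (fun v => decide (lu.1 ≤ v ∧ v ≤ lu.2)) : Nat) : Int))).sum =
          (ipairs.map (fun lu =>
          (((tickets.map vf).countP (fun v => decide (lu.1 ≤ v ∧ v ≤ lu.2)) : Nat) : Int))).sum := by
        apply congrArg List.sum
        apply List.map_congr_left
        intro lu _
        rw [hperm.countP_eq]
      rw [hcnt]
      have hswap := sum_count_swap (tickets.map vf) ipairs
      rw [List.map_map] at hswap
      exact hswap
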